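-- pv_equiv track=rewrite | github.com/pypi-data/pypi-mirror-404 | packages/servemd/servemd-0.1.0-py3-none-any.whl/docs_server/mcp/tools.py | format_page_list
-- ===== SOURCE A (Python) =====
-- def format_page_list(pages: list[dict[str, str]], category_filter: str | None = None) -> str:
--     """
--     Format the page list as a markdown string.
--
--     Args:
--         pages: List of page dictionaries with path, title, category
--         category_filter: Optional category that was used for filtering
--
--     Returns:
--         Formatted markdown string
--     """
--     if not pages:
--         if category_filter:
--             return f"No pages found in category: {category_filter}"
--         return "No documentation pages found."
--
--     lines = []
--
--     if category_filter:
--         lines.append(f"# Documentation Pages in '{category_filter}'\n")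
--     else:
--         lines.append("# Available Documentation Pages\n")
--
--     # Group by category
--     current_category = None
--
--     for page in pages:
--         category = page["category"] or "root"
--
--         if category != current_category:
--             current_category = category
--             lines.append(f"\n## {category.title()}\n")
--
--         lines.append(f"- [{page['title']}]({page['path']})")
--
--     lines.append(f"\n---\nTotal: {len(pages)} page(s)")
--
--     return "\n".join(lines)
-- ===== SOURCE B (Python) =====
-- def _cat(page):
--     return page["category"] or "root"
--
--
-- def _runs(pages):
--     """Two-pointer scan: split pages into maximal consecutive runs of one category."""
--     runs = []
--     i, n = 0, len(pages)
--     while i < n: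
--         c = _cat(pages[i])
--         j = i + 1
--         while j < n and _cat(pages[j]) == c:
--             j += 1
--         runs.append((c, pages[i:j]))
--         i = j
--     return runs
--
--
-- def format_page_list(pages, category_filter=None):
--     if not pages:
--         if category_filter:
--             return f"No pages found in category: {category_filter}"
--         return "No documentation pages found."
--     head = (f"# Documentation Pages in '{category_filter}'\n"
--             if category_filter else "# Available Documentation Pages\n")
--     body = []
--     for c, run in _runs(pages):
--         body.append(f"\n## {c.title()}\n")
--         body += [f"- [{p['title']}]({p['path']})" for p in run]
--     return "\n".join([head] + body + [f"\n---\nTotal: {len(pages)} page(s)"])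
-- ===== Notes on version B (the rewrite author's own statement) =====
-- stated objective: alternative
-- what changed: Replaces A's single-pass loop with current_category change-detection state by a two-phase decomposition: first split pages into maximal consecutive same-category runs with a two-pointer scan, then emit one header plus the item lines per run.
import Mathlib
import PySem

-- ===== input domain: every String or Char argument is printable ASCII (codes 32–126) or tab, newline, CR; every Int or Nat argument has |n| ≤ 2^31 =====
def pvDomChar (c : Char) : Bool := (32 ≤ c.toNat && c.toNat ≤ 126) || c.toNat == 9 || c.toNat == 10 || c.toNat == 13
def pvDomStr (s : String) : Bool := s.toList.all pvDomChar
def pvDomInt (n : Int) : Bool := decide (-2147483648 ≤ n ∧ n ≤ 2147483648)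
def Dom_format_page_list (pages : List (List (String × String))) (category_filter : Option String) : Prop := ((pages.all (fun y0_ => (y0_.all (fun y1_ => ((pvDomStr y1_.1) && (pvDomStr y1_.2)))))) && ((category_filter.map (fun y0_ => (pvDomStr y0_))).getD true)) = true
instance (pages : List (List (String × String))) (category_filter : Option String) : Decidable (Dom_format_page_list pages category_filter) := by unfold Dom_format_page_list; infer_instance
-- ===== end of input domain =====

-- B replaces A's single-pass current_category state machine by a two-phase decomposition
-- (first split pages into maximal consecutive same-category runs, then format each run);
-- objective: alternative decomposition, same cost.

-- ===== PORT A =====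
-- shared f-string helpers (both Pythons build the very same line strings)
-- hand port of str.title(), exact on ASCII (cased = isalpha on this domain):
-- a cased char starting a word is uppercased, cased chars after a cased char are lowercased
def pvTitleGo : List Char → Bool → List Char
  | [], _ => []
  | ch :: rest, prevCased =>
    if PySem.Chars.isalpha ch then
      (if prevCased then PySem.Chars.lowerChar ch else PySem.Chars.upperChar ch) :: pvTitleGo rest true
    else ch :: pvTitleGo rest false

def pvTitle (s : String) : String := String.ofList (pvTitleGo s.toList false)

-- page["category"] or "root"   (missing key excluded by Pre_)
def pvCat (p : List (String × String)) : String :=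
  let c := (p.lookup "category").getD ""
  if c = "" then "root" else c

-- f"- [{page['title']}]({page['path']})"
def pvItem (p : List (String × String)) : String :=
  "- [" ++ (p.lookup "title").getD "" ++ "](" ++ (p.lookup "path").getD "" ++ ")"

-- f"\n## {category.title()}\n"
def pvHdr (c : String) : String := "\n## " ++ pvTitle c ++ "\n"

-- Python truthiness of `category_filter` (None or '' are falsy)
def pvTruthy : Option String → Bool
  | none => false
  | some s => !(s == "")

def pvHead (cf : Option String) : String :=
  if pvTruthy cf then "# Documentation Pages in '" ++ cf.getD "" ++ "'\n"
  else "# Available Documentation Pages\n"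

-- f"\n---\nTotal: {len(pages)} page(s)"
def pvTotal (pages : List (List (String × String))) : String :=
  "\n---\nTotal: " ++ PySem.Int.toStr (pages.length : Int) ++ " page(s)"

-- A's for-loop over pages with state current_category, emitting the appended lines
def pvLoopA : List (List (String × String)) → Option String → List String
  | [], _ => []
  | p :: rest, cur =>
    let c := pvCat p
    if some c ≠ cur then pvHdr c :: pvItem p :: pvLoopA rest (some c)
    else pvItem p :: pvLoopA rest cur

def format_page_list (pages : List (List (String × String))) (category_filter : Option String) : String :=
  if pages = [] then
    if pvTruthy category_filter then
      "No pages found in category: " ++ category_filter.getD ""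
    else "No documentation pages found."
  else
    PySem.Str.join "\n" (pvHead category_filter :: (pvLoopA pages none ++ [pvTotal pages]))

-- ===== PORT B =====
-- _runs: two-pointer scan into maximal consecutive same-category runs
-- (the inner `while j < n and _cat(pages[j]) == c` scan is takeWhile/dropWhile of the tail — exact)
def pvRuns : List (List (String × String)) → List (String × List (List (String × String)))
  | [] => []
  | p :: rest =>
    let c := pvCat p
    (c, p :: rest.takeWhile (fun q => pvCat q == c)) :: pvRuns (rest.dropWhile (fun q => pvCat q == c))
termination_by l => l.length
decreasing_by
  simpa using Nat.lt_succ_of_le (List.length_dropWhile_le _ _)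

def format_page_list_alt (pages : List (List (String × String))) (category_filter : Option String) : String :=
  if pages = [] then
    if pvTruthy category_filter then
      "No pages found in category: " ++ category_filter.getD ""
    else "No documentation pages found."
  else
    PySem.Str.join "\n"
      ((pvHead category_filter :: (pvRuns pages).flatMap (fun r => pvHdr r.1 :: r.2.map pvItem))
        ++ [pvTotal pages])

-- ===== PRECONDITION & SPEC =====
-- Pre_ excludes exactly the inputs where A raises KeyError: some page lacking
-- the "category", "title" or "path" key.
def Pre_format_page_list (pages : List (List (String × String))) (category_filter : Option String) : Prop :=
  (pages.all (fun p =>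
    (p.lookup "category").isSome && (p.lookup "title").isSome && (p.lookup "path").isSome)) = true
instance (pages : List (List (String × String))) (category_filter : Option String) : Decidable (Pre_format_page_list pages category_filter) := by unfold Pre_format_page_list; infer_instance

def pvWitness_format_page_list : (List (List (String × String))) × Option String :=
  ([[("category", "guides"), ("title", "Intro"), ("path", "docs/intro.md")]], some "guides")

def Spec_format_page_list (pages : List (List (String × String))) (category_filter : Option String) (out : String) : Prop := out = format_page_list_alt pages category_filter
instance (pages : List (List (String × String))) (category_filter : Option String) (out : String) : Decidable (Spec_format_page_list pages category_filter out) := by unfold Spec_format_page_list; infer_instance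

-- ===== CLAIM (what is proved, stated in full; the proofs are below) =====
def Claim_equal_format_page_list : Prop := ∀ (pages : List (List (String × String))) (category_filter : Option String), Dom_format_page_list pages category_filter → Pre_format_page_list pages category_filter → Spec_format_page_list pages category_filter (format_page_list pages category_filter)

-- ===== LEMMAS AND PROOFS =====

-- A's loop, resumed inside a category c, emits exactly the items of the current run
-- followed by B's rendering of the remaining runs.
theorem pvLoopA_some (rest : List (List (String × String))) (c : String) :
    pvLoopA rest (some c) =
      (rest.takeWhile (fun q => pvCat q == c)).map pvItem
        ++ (pvRuns (rest.dropWhile (fun q => pvCat q == c))).flatMap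
             (fun r => pvHdr r.1 :: r.2.map pvItem) := by
  induction rest generalizing c with
  | nil => simp [pvLoopA, pvRuns]
  | cons q rest ih =>
    by_cases h : pvCat q = c
    · simp [pvLoopA, h, ih]
    · simp [pvLoopA, h, pvRuns, ih (pvCat q)]

-- starting from current_category = None, A's loop emits exactly B's run-by-run body
theorem pvLoopA_none (pages : List (List (String × String))) :
    pvLoopA pages none =
      (pvRuns pages).flatMap (fun r => pvHdr r.1 :: r.2.map pvItem) := by
  cases pages with
  | nil => simp [pvLoopA, pvRuns]
  | cons p rest => simp [pvLoopA, pvRuns, pvLoopA_some]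

-- ===== VERDICT (by name: the statement is the Claim_ definition above) =====
theorem format_page_list_spec : Claim_equal_format_page_list := by
  intro pages cf _ _
  unfold Spec_format_page_list format_page_list format_page_list_alt
  by_cases h : pages = []
  · simp [h]
  · simp [h, pvLoopA_none]
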